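-- pv_equiv track=rewrite | github.com/joshika39/elte-studies | dimat_I/relations/relations.py | is_dichotomous
-- ===== SOURCE A (Python) =====
-- def is_dichotomous(set, relation):
--     for x in set:
--         for y in set:
--             if x == y:
--                 continue
--             if not ((x, y) in relation or not (y, x) in relation):
--                 return False
--     return True
-- ===== SOURCE B (Python) =====
-- def is_dichotomous(set, relation):
--     s = {(x, y) for x in set for y in set if x != y and (x, y) in relation}
--     return s == {(y, x) for (x, y) in s}
-- ===== Notes on version B (the rewrite author's own statement) =====
-- stated objective: alternative
-- what changed: A's interleaved quadratic scan with early return and a reversed-pair list-membership check inside the inner loop is replaced by materializing the set of off-diagonal pairs present in the relation and comparing it to its own transpose.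
import Mathlib
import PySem

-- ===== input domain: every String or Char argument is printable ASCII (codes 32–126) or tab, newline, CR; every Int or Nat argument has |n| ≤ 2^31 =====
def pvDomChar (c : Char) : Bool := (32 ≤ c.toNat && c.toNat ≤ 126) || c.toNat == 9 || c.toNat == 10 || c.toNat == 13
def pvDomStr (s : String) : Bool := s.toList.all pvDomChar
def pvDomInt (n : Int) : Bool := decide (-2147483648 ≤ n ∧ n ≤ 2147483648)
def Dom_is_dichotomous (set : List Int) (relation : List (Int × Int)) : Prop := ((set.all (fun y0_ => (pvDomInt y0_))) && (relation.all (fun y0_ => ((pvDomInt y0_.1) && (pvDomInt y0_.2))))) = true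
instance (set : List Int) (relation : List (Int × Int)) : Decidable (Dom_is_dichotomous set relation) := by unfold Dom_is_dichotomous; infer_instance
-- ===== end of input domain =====

-- B replaces A's interleaved scan-and-check loop with build-the-off-diagonal-pair-set-then-compare-to-its-transpose (alternative decomposition, same cost).

-- ===== PORT A =====
-- inner 'for y in set' loop: continue on x == y, early 'return False' on the failing check
def pvAInner (relation : List (Int × Int)) (x : Int) : List Int → Bool
  | [] => true
  | y :: ys =>
    if x = y then pvAInner relation x ys
    else if !(relation.contains (x, y) || !relation.contains (y, x)) then false
    else pvAInner relation x ys

-- outer 'for x in set' loop; a False from the inner loop returns immediately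
def pvAOuter (relation : List (Int × Int)) (set0 : List Int) : List Int → Bool
  | [] => true
  | x :: xs => if pvAInner relation x set0 then pvAOuter relation set0 xs else false

def is_dichotomous (set : List Int) (relation : List (Int × Int)) : Bool :=
  pvAOuter relation set set

-- ===== PORT B =====
def is_dichotomous_alt (set : List Int) (relation : List (Int × Int)) : Bool :=
  let s : PySem.Set (Int × Int) :=
    PySem.Set.ofList (set.flatMap (fun x =>
      (set.filter (fun y => x != y && relation.contains (x, y))).map (fun y => (x, y))))
  let t : PySem.Set (Int × Int) := PySem.Set.ofList (s.map (fun p => (p.2, p.1)))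
  PySem.Set.equal s t

-- ===== PRECONDITION & SPEC =====
def Spec_is_dichotomous (set : List Int) (relation : List (Int × Int)) (out : Bool) : Prop := out = is_dichotomous_alt set relation
instance (set : List Int) (relation : List (Int × Int)) (out : Bool) : Decidable (Spec_is_dichotomous set relation out) := by unfold Spec_is_dichotomous; infer_instance

-- ===== CLAIM (what is proved, stated in full; the proofs are below) =====
def Claim_equal_is_dichotomous : Prop := ∀ (set : List Int) (relation : List (Int × Int)), Dom_is_dichotomous set relation → Spec_is_dichotomous set relation (is_dichotomous set relation)

-- ===== LEMMAS AND PROOFS =====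

-- characterisation of A's inner loop
theorem pvAInner_iff (relation : List (Int × Int)) (x : Int) (ys : List Int) :
    pvAInner relation x ys = true ↔
      ∀ y ∈ ys, x ≠ y → ((x, y) ∈ relation ∨ (y, x) ∉ relation) := by
  induction ys with
  | nil => simp [pvAInner]
  | cons y ys ih =>
    by_cases hxy : x = y
    · subst hxy
      simpa [pvAInner] using ih
    · by_cases hc : ((x, y) ∈ relation ∨ (y, x) ∉ relation)
      · have hb : (!(relation.contains (x, y) || !relation.contains (y, x))) = false := by
          simp only [Bool.not_eq_eq_eq_not, Bool.not_false, Bool.or_eq_true,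
            List.contains_iff_mem, Bool.not_eq_true]
          rcases hc with h | h
          · simp [h]
          · simp [h]
        have hstep : pvAInner relation x (y :: ys) = pvAInner relation x ys := by
          conv_lhs => rw [pvAInner]
          rw [if_neg hxy, hb]
          simp
        rw [hstep, ih]
        constructor
        · intro h z hz hne
          rcases List.mem_cons.mp hz with rfl | hz
          · exact hc
          · exact h z hz hne
        · intro h z hz hne
          exact h z (List.mem_cons_of_mem _ hz) hne
      · have hb : (!(relation.contains (x, y) || !relation.contains (y, x))) = true := by
          push_neg at hc
          simp [hc.1, hc.2]
        have hstep : pvAInner relation x (y :: ys) = false := by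
          conv_lhs => rw [pvAInner]
          rw [if_neg hxy, hb]
          simp
        rw [hstep]
        simp only [Bool.false_eq_true, false_iff]
        intro h
        exact hc (h y List.mem_cons_self hxy)

-- characterisation of A's outer loop
theorem pvAOuter_iff (relation : List (Int × Int)) (set0 xs : List Int) :
    pvAOuter relation set0 xs = true ↔ ∀ x ∈ xs, pvAInner relation x set0 = true := by
  induction xs with
  | nil => simp [pvAOuter]
  | cons x xs ih =>
    by_cases h : pvAInner relation x set0 = true
    · simp [pvAOuter, h, ih]
    · have hstep : pvAOuter relation set0 (x :: xs) = false := by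
        simp [pvAOuter, h]
      rw [hstep]
      simp only [Bool.false_eq_true, false_iff]
      intro hall
      exact h (hall x List.mem_cons_self)

-- membership in B's pair list
theorem pvB_mem (set : List Int) (relation : List (Int × Int)) (p : Int × Int) :
    p ∈ set.flatMap (fun x =>
        (set.filter (fun y => x != y && relation.contains (x, y))).map (fun y => (x, y))) ↔
      p.1 ∈ set ∧ p.2 ∈ set ∧ p.1 ≠ p.2 ∧ p ∈ relation := by
  obtain ⟨a, b⟩ := p
  simp only [List.mem_flatMap, List.mem_map, List.mem_filter, Bool.and_eq_true, bne_iff_ne,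
    ne_eq, List.contains_iff_mem]
  constructor
  · rintro ⟨x, hx, y, ⟨hy, hne, hr⟩, h⟩
    injection h with h1 h2
    subst h1; subst h2
    exact ⟨hx, hy, hne, hr⟩
  · rintro ⟨ha, hb, hne, hr⟩
    exact ⟨a, ha, b, ⟨hb, hne, hr⟩, rfl⟩

-- ===== VERDICT (by name: the statement is the Claim_ definition above) =====
theorem is_dichotomous_spec : Claim_equal_is_dichotomous := by
  intro set relation _
  unfold Spec_is_dichotomous is_dichotomous is_dichotomous_alt
  set L := set.flatMap (fun x =>
      (set.filter (fun y => x != y && relation.contains (x, y))).map (fun y => (x, y))) with hL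
  have hmemS : ∀ p : Int × Int, p ∈ PySem.Set.ofList L ↔
      (p.1 ∈ set ∧ p.2 ∈ set ∧ p.1 ≠ p.2 ∧ p ∈ relation) := by
    intro p; rw [PySem.Set.mem_ofList]; exact pvB_mem set relation p
  have hmemT : ∀ p : Int × Int, p ∈ PySem.Set.ofList ((PySem.Set.ofList L).map (fun q => (q.2, q.1))) ↔
      ((p.2, p.1) ∈ PySem.Set.ofList L) := by
    intro p
    rw [PySem.Set.mem_ofList]
    simp only [List.mem_map]
    constructor
    · rintro ⟨q, hq, h⟩
      subst h
      simpa using hq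
    · intro h; exact ⟨(p.2, p.1), h, rfl⟩
  -- both sides are the symmetry property of the off-diagonal pair set
  by_cases hP : ∀ x ∈ set, ∀ y ∈ set, x ≠ y → ((x, y) ∈ relation ∨ (y, x) ∉ relation)
  · have hA : pvAOuter relation set set = true := by
      rw [pvAOuter_iff]
      intro x hx; rw [pvAInner_iff]; exact fun y hy => hP x hx y hy
    have hB : PySem.Set.equal (PySem.Set.ofList L)
        (PySem.Set.ofList ((PySem.Set.ofList L).map (fun q => (q.2, q.1)))) = true := by
      rw [PySem.Set.equal_iff]
      intro p
      rw [hmemT, hmemS, hmemS]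
      constructor
      · rintro ⟨h1, h2, hne, hr⟩
        refine ⟨h2, h1, fun h => hne h.symm, ?_⟩
        rcases hP p.2 h2 p.1 h1 (fun h => hne h.symm) with h | h
        · exact h
        · exact absurd hr h
      · rintro ⟨h2, h1, hne, hr⟩
        refine ⟨h1, h2, fun h => hne h.symm, ?_⟩
        rcases hP p.1 h1 p.2 h2 (fun h => hne h.symm) with h | h
        · exact h
        · exact absurd hr h
    simp only [hA, hB]
  · push_neg at hP
    obtain ⟨x, hx, y, hy, hne, hxy, hyx⟩ := hP
    have hA : pvAOuter relation set set = false := by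
      rw [Bool.eq_false_iff]
      intro h
      have := ((pvAInner_iff relation x set).mp (((pvAOuter_iff relation set set).mp h) x hx)) y hy hne
      rcases this with h' | h'
      · exact hxy h'
      · exact h' hyx
    have hB : PySem.Set.equal (PySem.Set.ofList L)
        (PySem.Set.ofList ((PySem.Set.ofList L).map (fun q => (q.2, q.1)))) = false := by
      rw [Bool.eq_false_iff]
      intro h
      rw [PySem.Set.equal_iff] at h
      have h1 : ((x, y) : Int × Int) ∈ PySem.Set.ofList ((PySem.Set.ofList L).map (fun q => (q.2, q.1))) := by
        rw [hmemT]
        exact (hmemS (y, x)).mpr ⟨hy, hx, fun h => hne h.symm, hyx⟩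
      have h2 := (h (x, y)).mpr h1
      exact hxy ((hmemS (x, y)).mp h2).2.2.2
    simp only [hA, hB]
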